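-- pv_equiv track=rewrite | github.com/RedBearAK/PDF-Manipulator | pdf_manipulator/core/page_range/page_range_parser.py | _operators_are_quoted
-- ===== SOURCE A (Python) =====
-- def _operators_are_quoted(text: str) -> bool:
--     """Check if boolean operators are inside quoted strings."""
--     operators = [' & ', ' | ']
--
--     for quote in ['"', "'"]:
--         if quote in text:
--             parts = text.split(quote)
--             for i in range(1, len(parts), 2):  # Check odd indices (inside quotes)
--                 if any(op in parts[i] for op in operators):
--                     return True
--     return False
-- ===== SOURCE B (Python) =====
-- def _operators_are_quoted(text: str) -> bool:
--     """Check if boolean operators are inside quoted strings."""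
--     in_dq = in_sq = False
--     for i in range(len(text)):
--         if (in_dq or in_sq) and (text.startswith(' & ', i) or text.startswith(' | ', i)):
--             return True
--         c = text[i]
--         if c == '"':
--             in_dq = not in_dq
--         elif c == "'":
--             in_sq = not in_sq
--     return False
-- ===== Notes on version B (the rewrite author's own statement) =====
-- stated objective: alternative
-- what changed: Replaces the split-on-each-quote-char + scan-odd-segments strategy by a single left-to-right scan that tracks the parity of each quote type independently and tests for an operator occurrence at each position.
import Mathlib
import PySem

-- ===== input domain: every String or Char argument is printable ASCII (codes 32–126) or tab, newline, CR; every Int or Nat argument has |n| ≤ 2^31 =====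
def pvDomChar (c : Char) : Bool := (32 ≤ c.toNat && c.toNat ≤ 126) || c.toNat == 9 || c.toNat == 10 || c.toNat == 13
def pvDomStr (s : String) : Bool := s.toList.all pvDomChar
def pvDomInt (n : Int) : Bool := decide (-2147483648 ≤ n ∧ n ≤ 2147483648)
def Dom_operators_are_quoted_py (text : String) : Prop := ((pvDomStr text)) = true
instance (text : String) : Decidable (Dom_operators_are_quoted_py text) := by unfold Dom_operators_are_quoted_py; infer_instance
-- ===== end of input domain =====

-- B replaces A's split-into-segments + odd-index scan by one left-to-right scan tracking both quote parities; same return value (alternative decomposition, no speed claim).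

-- ===== PORT A =====
def operators_are_quoted_py (text : String) : Bool :=
  let operators : List String := [" & ", " | "]
  ['"', '\''].any fun quote =>
    if PySem.Chars.isIn [quote] text.toList then
      let parts := PySem.Chars.splitOn text.toList [quote]
      (PySem.List.pyRange 1 (parts.length : Int) 2).any fun i =>
        operators.any fun op => PySem.Chars.isIn op.toList (PySem.List.pyGetD parts i [])
    else false

-- ===== PORT B =====
def pvB_go : List Char → Bool → Bool → Bool
  | [], _, _ => false
  | c :: rest, in_dq, in_sq =>
    if (in_dq || in_sq) &&
        (PySem.Chars.startswith (c :: rest) " & ".toList ||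
         PySem.Chars.startswith (c :: rest) " | ".toList) then
      true
    else
      pvB_go rest (if c = '"' then !in_dq else in_dq) (if c = '\'' then !in_sq else in_sq)

def operators_are_quoted_py_alt (text : String) : Bool :=
  pvB_go text.toList false false

-- ===== PRECONDITION & SPEC =====
def Spec_operators_are_quoted_py (text : String) (out : Bool) : Prop := out = operators_are_quoted_py_alt text
instance (text : String) (out : Bool) : Decidable (Spec_operators_are_quoted_py text out) := by unfold Spec_operators_are_quoted_py; infer_instance

-- ===== CLAIM (what is proved, stated in full; the proofs are below) =====
def Claim_equal_operators_are_quoted_py : Prop := ∀ (text : String), Dom_operators_are_quoted_py text → Spec_operators_are_quoted_py text (operators_are_quoted_py text)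

-- ===== LEMMAS AND PROOFS =====

-- "contains an operator" on an isolated segment (A's inner test)
def pvOpIn (p : List Char) : Bool :=
  PySem.Chars.isIn " & ".toList p || PySem.Chars.isIn " | ".toList p

-- "an operator starts here"
def pvHasOp (l : List Char) : Bool :=
  PySem.Chars.startswith l " & ".toList || PySem.Chars.startswith l " | ".toList

-- single-quote-char scan with an inside/outside parity flag
def pvScan1 (q : Char) : List Char → Bool → Bool
  | [], _ => false
  | c :: r, inside =>
    if c = q then pvScan1 q r (!inside)
    else (inside && pvHasOp (c :: r)) || pvScan1 q r inside

-- reference splitter (cur is the reversed current segment)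
def pvSplitQ (q : Char) : List Char → List Char → List (List Char)
  | [], cur => [cur.reverse]
  | c :: r, cur => if c = q then cur.reverse :: pvSplitQ q r [] else pvSplitQ q r (c :: cur)

-- A's odd-index any, phrased recursively with a parity flag
def pvOddAny : List (List Char) → Bool → Bool
  | [], _ => false
  | p :: t, b => (b && pvOpIn p) || pvOddAny t (!b)

theorem pvPrefix_boundary {op x J : List Char} {q : Char} (hq : q ∉ op) :
    op <+: x ++ q :: J ↔ op <+: x := by
  constructor
  · intro h
    have h1 : op = (x ++ q :: J).take op.length := List.prefix_iff_eq_take.mp h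
    rw [List.take_append] at h1
    by_cases hlen : op.length ≤ x.length
    · have hz : op.length - x.length = 0 := by omega
      rw [hz] at h1
      simp at h1
      rw [h1]
      exact List.take_prefix _ _
    · exfalso
      apply hq
      rw [h1]
      apply List.mem_append_right
      cases hn : op.length - x.length with
      | zero => omega
      | succ m => simp
  · intro h
    exact h.trans (x.prefix_append (q :: J))

theorem pvHasOp_append (x J : List Char) (q : Char)
    (hq1 : q ∉ " & ".toList) (hq2 : q ∉ " | ".toList) :
    pvHasOp (x ++ q :: J) = pvHasOp x := by
  rw [Bool.eq_iff_iff]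
  simp only [pvHasOp, Bool.or_eq_true, PySem.Chars.startswith_iff]
  rw [pvPrefix_boundary hq1, pvPrefix_boundary hq2]

theorem pvOpIn_cons (c : Char) (r : List Char) :
    pvOpIn (c :: r) = (pvHasOp (c :: r) || pvOpIn r) := by
  rw [Bool.eq_iff_iff]
  simp only [pvOpIn, pvHasOp, Bool.or_eq_true, PySem.Chars.isIn_iff_infix,
    PySem.Chars.startswith_iff, List.infix_cons_iff]
  tauto

theorem pvOpIn_nil : pvOpIn [] = false := by decide

theorem pvScan1_free (q : Char) (p : List Char) (hp : q ∉ p) (b : Bool) :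
    pvScan1 q p b = (b && pvOpIn p) := by
  induction p with
  | nil => simp [pvScan1, pvOpIn_nil]
  | cons c r ih =>
    have hc : c ≠ q := fun h => hp (h ▸ List.mem_cons_self ..)
    have hr : q ∉ r := fun h => hp (List.mem_cons_of_mem _ h)
    simp only [pvScan1, if_neg hc, ih hr, pvOpIn_cons]
    cases b <;> simp

theorem pvScan1_seg (q : Char) (hq1 : q ∉ " & ".toList) (hq2 : q ∉ " | ".toList)
    (p : List Char) (hp : q ∉ p) (J : List Char) (b : Bool) :
    pvScan1 q (p ++ q :: J) b = ((b && pvOpIn p) || pvScan1 q J (!b)) := by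
  induction p with
  | nil => simp [pvScan1, pvOpIn_nil]
  | cons c r ih =>
    have hc : c ≠ q := fun h => hp (h ▸ List.mem_cons_self ..)
    have hr : q ∉ r := fun h => hp (List.mem_cons_of_mem _ h)
    have hstep : (c :: r) ++ q :: J = c :: (r ++ q :: J) := rfl
    rw [hstep]
    simp only [pvScan1, if_neg hc, ih hr]
    have hops : pvHasOp (c :: (r ++ q :: J)) = pvHasOp (c :: r) := by
      have := pvHasOp_append (c :: r) J q hq1 hq2
      simpa using this
    rw [hops, pvOpIn_cons]
    cases b <;> simp [Bool.or_assoc]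

theorem pvSplitQ_ne_nil (q : Char) (cs cur : List Char) : pvSplitQ q cs cur ≠ [] := by
  induction cs generalizing cur with
  | nil => simp [pvSplitQ]
  | cons c r ih =>
    simp only [pvSplitQ]
    split
    · simp
    · exact ih _

theorem pvJoin_splitQ (q : Char) (cs : List Char) : ∀ cur,
    PySem.Chars.join [q] (pvSplitQ q cs cur) = cur.reverse ++ cs := by
  induction cs with
  | nil => intro cur; simp [pvSplitQ, PySem.Chars.join_singleton]
  | cons c r ih =>
    intro cur
    by_cases hc : c = q
    · subst hc
      have hsp : pvSplitQ c (c :: r) cur = cur.reverse :: pvSplitQ c r [] := by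
        simp [pvSplitQ]
      rw [hsp]
      cases h : pvSplitQ c r [] with
      | nil => exact absurd h (pvSplitQ_ne_nil c r [])
      | cons p t =>
        rw [PySem.Chars.join_cons_cons, ← h, ih []]
        simp
    · have hsp : pvSplitQ q (c :: r) cur = pvSplitQ q r (c :: cur) := by
        simp [pvSplitQ, hc]
      rw [hsp, ih (c :: cur)]
      simp

theorem pvSplitQ_free (q : Char) (cs : List Char) : ∀ cur, q ∉ cur →
    ∀ p ∈ pvSplitQ q cs cur, q ∉ p := by
  induction cs with
  | nil =>
    intro cur hcur p hp
    simp only [pvSplitQ, List.mem_singleton] at hp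
    subst hp
    simpa using hcur
  | cons c r ih =>
    intro cur hcur p hp
    by_cases hc : c = q
    · subst hc
      have hsp : pvSplitQ c (c :: r) cur = cur.reverse :: pvSplitQ c r [] := by
        simp [pvSplitQ]
      rw [hsp, List.mem_cons] at hp
      rcases hp with rfl | hp
      · simpa using hcur
      · exact ih [] (by simp) p hp
    · have hsp : pvSplitQ q (c :: r) cur = pvSplitQ q r (c :: cur) := by
        simp [pvSplitQ, hc]
      rw [hsp] at hp
      refine ih (c :: cur) ?_ p hp
      simp only [List.mem_cons]
      rintro (rfl | hm)
      · exact hc rfl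
      · exact hcur hm

theorem pvScan_join (q : Char) (hq1 : q ∉ " & ".toList) (hq2 : q ∉ " | ".toList) :
    ∀ parts, parts ≠ [] → (∀ p ∈ parts, q ∉ p) → ∀ b,
    pvScan1 q (PySem.Chars.join [q] parts) b = pvOddAny parts b := by
  intro parts
  induction parts with
  | nil => intro h; exact absurd rfl h
  | cons p t ih =>
    intro _ hfree b
    cases t with
    | nil =>
      rw [PySem.Chars.join_singleton]
      simp [pvOddAny, pvScan1_free q p (hfree p (by simp)) b]
    | cons p2 t2 =>
      rw [PySem.Chars.join_cons_cons]
      have : p ++ [q] ++ PySem.Chars.join [q] (p2 :: t2)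
          = p ++ q :: PySem.Chars.join [q] (p2 :: t2) := by simp
      rw [this, pvScan1_seg q hq1 hq2 p (hfree p (by simp)) _ b,
        ih (by simp) (fun x hx => hfree x (List.mem_cons_of_mem _ hx)) (!b)]
      simp [pvOddAny]

theorem pvGo_eq (q : Char) : ∀ (fuel : Nat) (l cur : List Char) (acc : List (List Char)),
    l.length < fuel →
    PySem.Chars.splitOn.go [q] fuel l cur acc = acc.reverse ++ pvSplitQ q l cur := by
  intro fuel
  induction fuel with
  | zero => intro l cur acc h; omega
  | succ n ih =>
    intro l cur acc h
    cases l with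
    | nil =>
      rw [PySem.Chars.splitOn.go.eq_def]
      simp [pvSplitQ]
    | cons c rest =>
      by_cases hqc : q = c
      · subst hqc
        have hres : PySem.Chars.splitOn.go [q] (n + 1) (q :: rest) cur acc
            = PySem.Chars.splitOn.go [q] n rest [] (cur.reverse :: acc) := by
          rw [PySem.Chars.splitOn.go.eq_def]
          simp [List.isPrefixOf]
        have hlen : rest.length < n := by simp at h; omega
        rw [hres, ih rest [] (cur.reverse :: acc) hlen]
        have hsp : pvSplitQ q (q :: rest) cur = cur.reverse :: pvSplitQ q rest [] := by
          simp [pvSplitQ]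
        rw [hsp]
        simp
      · have hc' : c ≠ q := fun hh => hqc hh.symm
        have hres : PySem.Chars.splitOn.go [q] (n + 1) (c :: rest) cur acc
            = PySem.Chars.splitOn.go [q] n rest (c :: cur) acc := by
          rw [PySem.Chars.splitOn.go.eq_def]
          simp [List.isPrefixOf, hqc]
        have hlen : rest.length < n := by simp at h; omega
        rw [hres, ih rest (c :: cur) acc hlen]
        have hsp : pvSplitQ q (c :: rest) cur = pvSplitQ q rest (c :: cur) := by
          simp [pvSplitQ, hc']
        rw [hsp]

theorem pvSplitOn_eq (q : Char) (cs : List Char) :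
    PySem.Chars.splitOn cs [q] = pvSplitQ q cs [] := by
  unfold PySem.Chars.splitOn
  rw [pvGo_eq q (cs.length + 1) cs [] [] (by omega)]
  simp

theorem pvOddAny_iff (parts : List (List Char)) : ∀ b,
    (pvOddAny parts b = true ↔
      ∃ j, j < parts.length ∧ (j % 2 = if b then 0 else 1) ∧ pvOpIn (parts.getD j []) = true) := by
  induction parts with
  | nil => intro b; simp [pvOddAny]
  | cons p t ih =>
    intro b
    simp only [pvOddAny, Bool.or_eq_true, Bool.and_eq_true, ih (!b)]
    constructor
    · rintro (⟨hb, hop⟩ | ⟨j, hj, hpar, hop⟩)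
      · exact ⟨0, by simp, by cases b <;> simp_all, by simpa using hop⟩
      · refine ⟨j + 1, by simp; omega, ?_, by simpa using hop⟩
        cases b <;> simp_all <;> omega
    · rintro ⟨j, hj, hpar, hop⟩
      cases j with
      | zero =>
        left
        cases b with
        | false => simp at hpar
        | true => exact ⟨rfl, by simpa using hop⟩
      | succ m =>
        right
        refine ⟨m, by simp at hj; omega, ?_, by simpa using hop⟩
        cases b <;> simp_all <;> omega

theorem pvIdx (parts : List (List Char)) :
    ((PySem.List.pyRange 1 (parts.length : Int) 2).any fun i =>
      (PySem.Chars.isIn " & ".toList (PySem.List.pyGetD parts i []) ||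
       PySem.Chars.isIn " | ".toList (PySem.List.pyGetD parts i []))) = pvOddAny parts false := by
  rw [Bool.eq_iff_iff, List.any_eq_true, pvOddAny_iff parts false]
  constructor
  · rintro ⟨i, hi, hp⟩
    rw [PySem.List.mem_pyRange_iff_of_pos (by norm_num)] at hi
    obtain ⟨h1, h2, h3⟩ := hi
    refine ⟨i.toNat, by omega, by simp; omega, ?_⟩
    rw [PySem.List.pyGetD_of_nonneg parts [] (by omega)] at hp
    simpa [pvOpIn] using hp
  · rintro ⟨j, hj, hpar, hop⟩
    have hpar' : j % 2 = 1 := by simpa using hpar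
    refine ⟨(j : Int), ?_, ?_⟩
    · rw [PySem.List.mem_pyRange_iff_of_pos (by norm_num)]
      refine ⟨by omega, by omega, by omega⟩
    · rw [PySem.List.pyGetD_of_nonneg parts [] (by omega)]
      simpa [pvOpIn] using hop

theorem pvSingleton_infix {q : Char} {cs : List Char} (h : q ∈ cs) : [q] <:+: cs := by
  obtain ⟨s, t, rfl⟩ := List.append_of_mem h
  exact ⟨s, t, by simp⟩

theorem pvAside (q : Char) (hq1 : q ∉ " & ".toList) (hq2 : q ∉ " | ".toList) (cs : List Char) :
    (if PySem.Chars.isIn [q] cs = true then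
      (PySem.List.pyRange 1 ((PySem.Chars.splitOn cs [q]).length : Int) 2).any fun i =>
        (PySem.Chars.isIn " & ".toList (PySem.List.pyGetD (PySem.Chars.splitOn cs [q]) i []) ||
         PySem.Chars.isIn " | ".toList (PySem.List.pyGetD (PySem.Chars.splitOn cs [q]) i []))
     else false) = pvScan1 q cs false := by
  by_cases h : PySem.Chars.isIn [q] cs = true
  · rw [if_pos h, pvSplitOn_eq, pvIdx,
      ← pvScan_join q hq1 hq2 (pvSplitQ q cs []) (pvSplitQ_ne_nil q cs [])
        (pvSplitQ_free q cs [] (by simp)) false,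
      pvJoin_splitQ q cs []]
    simp
  · rw [if_neg h]
    have hnm : q ∉ cs := by
      intro hm
      exact h ((PySem.Chars.isIn_iff_infix [q] cs).mpr (pvSingleton_infix hm))
    rw [pvScan1_free q cs hnm false]
    simp

theorem pvHasOp_quote {c : Char} (r : List Char) (h1 : c ≠ ' ') : pvHasOp (c :: r) = false := by
  have ha : PySem.Chars.startswith (c :: r) [' ', '&', ' '] = false := by
    rw [Bool.eq_false_iff]
    intro hcon
    rw [PySem.Chars.startswith_iff] at hcon
    exact h1 (List.cons_prefix_cons.mp hcon).1.symm
  have hb : PySem.Chars.startswith (c :: r) [' ', '|', ' '] = false := by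
    rw [Bool.eq_false_iff]
    intro hcon
    rw [PySem.Chars.startswith_iff] at hcon
    exact h1 (List.cons_prefix_cons.mp hcon).1.symm
  simp [pvHasOp]
  exact ⟨ha, hb⟩

theorem pvBgo_eq (cs : List Char) : ∀ dq sq,
    pvB_go cs dq sq = (pvScan1 '"' cs dq || pvScan1 '\'' cs sq) := by
  induction cs with
  | nil => intro dq sq; simp [pvB_go, pvScan1]
  | cons c r ih =>
    intro dq sq
    have hgo : pvB_go (c :: r) dq sq =
        (((dq || sq) && pvHasOp (c :: r)) ||
          pvB_go r (if c = '"' then !dq else dq) (if c = '\'' then !sq else sq)) := by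
      by_cases hcond : ((dq || sq) && pvHasOp (c :: r)) = true
      · have h1 : pvB_go (c :: r) dq sq = true := by
          simp only [pvB_go]
          rw [if_pos (by simpa [pvHasOp] using hcond)]
        rw [h1, hcond]
        simp
      · have hfalse : ((dq || sq) && pvHasOp (c :: r)) = false := by
          cases hcc : ((dq || sq) && pvHasOp (c :: r)) with
          | false => rfl
          | true => exact absurd hcc hcond
        have h1 : pvB_go (c :: r) dq sq =
            pvB_go r (if c = '"' then !dq else dq) (if c = '\'' then !sq else sq) := by
          simp only [pvB_go]
          rw [if_neg (by simp only [pvHasOp] at hcond; exact hcond)]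
        rw [h1, hfalse]
        simp
    rw [hgo, ih]
    by_cases h1 : c = '"'
    · subst h1
      have hop : pvHasOp ('"' :: r) = false := pvHasOp_quote r (by decide)
      simp [pvScan1, hop]
    · by_cases h2 : c = '\''
      · subst h2
        have hop : pvHasOp ('\'' :: r) = false := pvHasOp_quote r (by decide)
        simp [pvScan1, hop, h1]
      · simp only [pvScan1, if_neg h1, if_neg h2]
        cases dq <;> cases sq <;> cases hH : pvHasOp (c :: r) <;>
          simp [Bool.or_comm]

-- ===== VERDICT (by name: the statement is the Claim_ definition above) =====
theorem operators_are_quoted_py_spec : Claim_equal_operators_are_quoted_py := by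
  intro text _hdom
  unfold Spec_operators_are_quoted_py
  show operators_are_quoted_py text = operators_are_quoted_py_alt text
  unfold operators_are_quoted_py operators_are_quoted_py_alt
  simp only [List.any_cons, List.any_nil, Bool.or_false]
  rw [pvAside '"' (by decide) (by decide), pvAside '\'' (by decide) (by decide),
    pvBgo_eq text.toList false false]
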